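-- pv_equiv track=rewrite | github.com/prof-carlos-colab/aulas-python-93313 | 7. Listas - Vetores/6. Pares - v3.py | verificar_numeros_negativos
-- ===== SOURCE A (Python) =====
-- def verificar_numeros_negativos(lista_numeros):
--     # Processamento.
--     lista_de_negativos = []
--     lista_de_positivos = []
--
--     for numero in lista_numeros:
--         if numero < 0:
--             lista_de_negativos.append(numero) # Inserindo um número negativo na lista_de_negativos.
--         else:
--             lista_de_positivos.append(numero) # Inserindo um número positivo na lista_de_positivos.
--
--     # comando len() - retorna a quantidade de elementos no vetor/lista.
--     quantidade_negativos = len(lista_de_negativos)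
--
--     # comando sum() - retorna a soma dos elementos no vetor/lista.
--     soma_positivos = sum(lista_de_positivos)
--
--     return quantidade_negativos, soma_positivos
-- ===== SOURCE B (Python) =====
-- def verificar_numeros_negativos(lista_numeros):
--     # Count negatives and derive the non-negative sum by the identity
--     # sum(non-negatives) = sum(all) - sum(negatives): no positive branch at all.
--     negativos = [numero for numero in lista_numeros if numero < 0]
--     return len(negativos), sum(lista_numeros) - sum(negativos)
-- ===== Notes on version B (the rewrite author's own statement) =====
-- stated objective: alternative
-- what changed: B never touches the non-negative elements: it filters the negatives once and derives the non-negative sum arithmetically as sum(lista_numeros) - sum(negativos), instead of A's partition into two lists followed by len() on one and sum() on the other.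
import Mathlib
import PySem

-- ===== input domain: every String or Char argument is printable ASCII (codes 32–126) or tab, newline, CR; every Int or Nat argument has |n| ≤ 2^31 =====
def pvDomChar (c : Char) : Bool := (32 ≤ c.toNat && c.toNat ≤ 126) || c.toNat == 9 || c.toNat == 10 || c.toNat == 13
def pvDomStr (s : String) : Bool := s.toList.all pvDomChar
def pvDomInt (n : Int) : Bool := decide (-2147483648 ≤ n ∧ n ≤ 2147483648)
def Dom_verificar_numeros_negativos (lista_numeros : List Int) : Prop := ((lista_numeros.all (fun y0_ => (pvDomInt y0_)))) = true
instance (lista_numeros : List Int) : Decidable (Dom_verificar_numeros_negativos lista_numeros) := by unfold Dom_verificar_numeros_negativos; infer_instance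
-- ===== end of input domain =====

-- ===== PORT A =====
-- B filters the negatives once and derives the non-negative sum as total - negatives' sum (alternative decomposition).
def verificar_numeros_negativos (lista_numeros : List Int) : Int × Int :=
  let p := lista_numeros.foldl
    (fun (acc : List Int × List Int) numero =>
      if numero < 0 then (acc.1 ++ [numero], acc.2) else (acc.1, acc.2 ++ [numero]))
    ([], [])
  ((p.1.length : Int), p.2.sum)

-- ===== PORT B =====
def verificar_numeros_negativos_alt (lista_numeros : List Int) : Int × Int :=
  let negativos := lista_numeros.filter (fun numero => numero < 0)
  ((negativos.length : Int), lista_numeros.sum - negativos.sum)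

-- ===== PRECONDITION & SPEC =====
def Spec_verificar_numeros_negativos (lista_numeros : List Int) (out : Int × Int) : Prop := out = verificar_numeros_negativos_alt lista_numeros
instance (lista_numeros : List Int) (out : Int × Int) : Decidable (Spec_verificar_numeros_negativos lista_numeros out) := by unfold Spec_verificar_numeros_negativos; infer_instance

-- ===== CLAIM (what is proved, stated in full; the proofs are below) =====
def Claim_equal_verificar_numeros_negativos : Prop := ∀ (lista_numeros : List Int), Dom_verificar_numeros_negativos lista_numeros → Spec_verificar_numeros_negativos lista_numeros (verificar_numeros_negativos lista_numeros)

-- ===== LEMMAS AND PROOFS =====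

lemma vnn_fold (l neg pos : List Int) :
    l.foldl
      (fun (acc : List Int × List Int) numero =>
        if numero < 0 then (acc.1 ++ [numero], acc.2) else (acc.1, acc.2 ++ [numero]))
      (neg, pos)
    = (neg ++ l.filter (fun n => n < 0), pos ++ l.filter (fun n => ¬ n < 0)) := by
  induction l generalizing neg pos with
  | nil => simp
  | cons x xs ih =>
    simp only [List.foldl_cons, List.filter_cons]
    by_cases h : x < 0
    · simp [h, ih]
    · simp [h, ih]

lemma vnn_sum_split (l : List Int) :
    (l.filter (fun n => ¬ n < 0)).sum = l.sum - (l.filter (fun n => n < 0)).sum := by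
  induction l with
  | nil => simp
  | cons x xs ih =>
    simp only [List.filter_cons, not_lt] at ih ⊢
    by_cases h : x < 0
    · simp [h, not_le.mpr h, ih]
    · simp [h, not_lt.mp h, ih]; ring

-- ===== VERDICT (by name: the statement is the Claim_ definition above) =====
theorem verificar_numeros_negativos_spec : Claim_equal_verificar_numeros_negativos := by
  intro l _
  unfold Spec_verificar_numeros_negativos verificar_numeros_negativos verificar_numeros_negativos_alt
  simp only [vnn_fold, List.nil_append, vnn_sum_split]
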